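-- pv_equiv track=rewrite | github.com/francofrachia/Repositorio-Algoritmos | ejercicios python/ejercicios/recursividad/recursividad/recursividad/ej22.py | usar_la_fuerza
-- ===== SOURCE A (Python) =====
-- def usar_la_fuerza(mochila, index=0):
--     if index >= len(mochila):
--         return (False, index)
--
--     objeto = mochila[index]
--
--     if objeto == "sable de luz":
--         return (True, index + 1)
--     else:
--         return usar_la_fuerza(mochila, index + 1)
-- ===== SOURCE B (Python) =====
-- def usar_la_fuerza(mochila, index=0):
--     if index >= len(mochila):
--         return (False, index)
--     try:
--         return (True, index + mochila[index:].index("sable de luz") + 1)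
--     except ValueError:
--         return (False, len(mochila))
-- ===== Notes on version B (the rewrite author's own statement) =====
-- stated objective: idiomatic
-- what changed: Replaces A's element-by-element recursion with a single slice plus one list.index call; Pre_ excludes index < -len(mochila), where A raises IndexError.
-- intended difference: On negative start indices where 'sable de luz' occurs in the list but only before the start position, A's negative-index wraparound makes the recursion spill past -1 and rescan the whole list from 0, returning (True, p+1) for the earliest occurrence; B scans only from the start position onward and returns (False, len(mochila)), the intended reading of a start index. — e.g. on usar_la_fuerza(["sable de luz", "x"], -1): A returns (true, 1), B returns (false, 2)
import Mathlib
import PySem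

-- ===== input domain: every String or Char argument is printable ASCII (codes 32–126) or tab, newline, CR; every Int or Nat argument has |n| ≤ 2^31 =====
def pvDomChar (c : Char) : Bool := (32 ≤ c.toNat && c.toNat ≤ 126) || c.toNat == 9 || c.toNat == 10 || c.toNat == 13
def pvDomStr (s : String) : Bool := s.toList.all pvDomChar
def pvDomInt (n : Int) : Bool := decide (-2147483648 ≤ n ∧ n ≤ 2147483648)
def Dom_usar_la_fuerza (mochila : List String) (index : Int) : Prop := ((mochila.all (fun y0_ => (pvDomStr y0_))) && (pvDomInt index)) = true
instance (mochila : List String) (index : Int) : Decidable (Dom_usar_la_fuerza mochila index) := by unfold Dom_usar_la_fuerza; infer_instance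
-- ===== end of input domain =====

-- B replaces A's element-by-element recursion with a single slice plus one list.index
-- call (idiomatic); A = B proved outside D_ (negative starts where A's wraparound
-- rescans from 0), and A ≠ B proved everywhere inside D_.

-- ===== PORT A =====
def usar_la_fuerza (mochila : List String) (index : Int) : Bool × Int :=
  if (mochila.length : Int) ≤ index then (false, index)
  else
    -- mochila[index]: IndexError (index < -len) is excluded by Pre_, so pyGetD is exact here
    let objeto := PySem.List.pyGetD mochila index ""
    if objeto = "sable de luz" then (true, index + 1)
    else usar_la_fuerza mochila (index + 1)
termination_by ((mochila.length : Int) - index).toNat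
decreasing_by omega

-- ===== PORT B =====
def usar_la_fuerza_alt (mochila : List String) (index : Int) : Bool × Int :=
  if (mochila.length : Int) ≤ index then (false, index)
  else
    match PySem.List.index? (PySem.List.slice mochila (some index) none) "sable de luz" with
    | some k => (true, index + (k : Int) + 1)
    | none => (false, (mochila.length : Int))

-- ===== PRECONDITION & SPEC =====
-- Pre_ excludes exactly index < -len(mochila), where A raises IndexError.
def Pre_usar_la_fuerza (mochila : List String) (index : Int) : Prop :=
  -(mochila.length : Int) ≤ index
instance (mochila : List String) (index : Int) : Decidable (Pre_usar_la_fuerza mochila index) := by unfold Pre_usar_la_fuerza; infer_instance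

def pvWitness_usar_la_fuerza : List String × Int := (["palo", "sable de luz"], 0)

-- On negative start indices where "sable de luz" occurs in the list but only before the
-- start position, A's negative-index wraparound makes the recursion spill past -1 and
-- rescan the whole list from 0, returning (True, p+1) for the earliest occurrence; B scans
-- only from the start position onward and returns (False, len(mochila)), the intended
-- reading of a start index.
def D_usar_la_fuerza (mochila : List String) (index : Int) : Prop :=
  index < 0 ∧ -(mochila.length : Int) ≤ index ∧ "sable de luz" ∈ mochila ∧
    "sable de luz" ∉ mochila.drop ((mochila.length : Int) + index).toNat
instance (mochila : List String) (index : Int) : Decidable (D_usar_la_fuerza mochila index) := by unfold D_usar_la_fuerza; infer_instance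

def Spec_usar_la_fuerza (mochila : List String) (index : Int) (out : Bool × Int) : Prop := ¬ D_usar_la_fuerza mochila index → out = usar_la_fuerza_alt mochila index
instance (mochila : List String) (index : Int) (out : Bool × Int) : Decidable (Spec_usar_la_fuerza mochila index out) := by unfold Spec_usar_la_fuerza; infer_instance

def pvDiffWitness_usar_la_fuerza : List String × Int := (["sable de luz", "x"], -1)
def pvDiffWitnessOut_usar_la_fuerza : (Bool × Int) × (Bool × Int) := ((true, 1), (false, 2))

-- ===== CLAIM (what is proved, stated in full; the proofs are below) =====
def Claim_unchanged_usar_la_fuerza : Prop := ∀ (mochila : List String) (index : Int), Dom_usar_la_fuerza mochila index → Pre_usar_la_fuerza mochila index → Spec_usar_la_fuerza mochila index (usar_la_fuerza mochila index)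
def Claim_changed_usar_la_fuerza : Prop := Dom_usar_la_fuerza (pvDiffWitness_usar_la_fuerza.1) (pvDiffWitness_usar_la_fuerza.2) ∧ Pre_usar_la_fuerza (pvDiffWitness_usar_la_fuerza.1) (pvDiffWitness_usar_la_fuerza.2) ∧ D_usar_la_fuerza (pvDiffWitness_usar_la_fuerza.1) (pvDiffWitness_usar_la_fuerza.2) ∧ usar_la_fuerza (pvDiffWitness_usar_la_fuerza.1) (pvDiffWitness_usar_la_fuerza.2) = pvDiffWitnessOut_usar_la_fuerza.1 ∧ usar_la_fuerza_alt (pvDiffWitness_usar_la_fuerza.1) (pvDiffWitness_usar_la_fuerza.2) = pvDiffWitnessOut_usar_la_fuerza.2 ∧ pvDiffWitnessOut_usar_la_fuerza.1 ≠ pvDiffWitnessOut_usar_la_fuerza.2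
def Claim_exact_usar_la_fuerza : Prop := ∀ (mochila : List String) (index : Int), Dom_usar_la_fuerza mochila index → Pre_usar_la_fuerza mochila index → D_usar_la_fuerza mochila index → usar_la_fuerza mochila index ≠ usar_la_fuerza_alt mochila index

-- ===== LEMMAS AND PROOFS =====

-- proof helper: the full sequence of elements A's recursion visits from 'index'
-- (a negative start walks the tail once and then spills over to the whole list from 0)
def pvScan (mochila : List String) (index : Int) : List String :=
  PySem.List.slice mochila (some index) none ++ (if index < 0 then mochila else [])

-- proof helper: A's value expressed as a first-match search over pvScan
def pvAwrap (mochila : List String) (index : Int) : Bool × Int :=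
  if (mochila.length : Int) ≤ index then (false, index)
  else
    match PySem.List.index? (pvScan mochila index) "sable de luz" with
    | some k => (true, index + (k : Int) + 1)
    | none => (false, (mochila.length : Int))

-- scan at the end of the walk is empty
lemma pvScan_len (mochila : List String) :
    pvScan mochila (mochila.length : Int) = [] := by
  unfold pvScan
  rw [PySem.List.slice_from mochila (by positivity)]
  simp

-- one step of the walk: scan(index) = mochila[index] :: scan(index+1)
lemma pvScan_cons (mochila : List String) (index : Int)
    (h1 : -(mochila.length : Int) ≤ index) (h2 : index < (mochila.length : Int)) :
    pvScan mochila index =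
      PySem.List.pyGetD mochila index "" :: pvScan mochila (index + 1) := by
  unfold pvScan
  rcases lt_or_ge index 0 with hneg | hpos
  · set k : Nat := (-index).toNat with hk
    have hik : index = -(k : Int) := by omega
    have hk1 : 0 < k := by omega
    have hkn : k ≤ mochila.length := by omega
    rw [hik, PySem.List.slice_from_neg_natCast mochila k hk1,
        PySem.List.pyGetD_neg_natCast mochila k "" hk1 hkn]
    have hlt : mochila.length - k < mochila.length := by omega
    rw [List.drop_eq_getElem_cons hlt]
    rcases Nat.lt_or_ge 1 k with hk2 | hk2
    · have e1 : -(k : Int) + 1 = -(((k - 1 : Nat)) : Int) := by omega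
      rw [e1, PySem.List.slice_from_neg_natCast mochila (k - 1) (by omega)]
      have e2 : mochila.length - (k - 1) = mochila.length - k + 1 := by omega
      rw [e2, if_pos (show (-(k : Int)) < 0 by omega),
          if_pos (show -(((k - 1 : Nat)) : Int) < 0 by omega)]
      rfl
    · have hk1' : k = 1 := by omega
      have e1 : -(k : Int) + 1 = 0 := by omega
      rw [e1, PySem.List.slice_from mochila (le_refl 0),
          if_pos (show (-(k : Int)) < 0 by omega)]
      have e2 : mochila.length - k + 1 = mochila.length := by omega
      simp [e2, List.drop_length]
  · rw [PySem.List.slice_from mochila hpos, PySem.List.slice_from mochila (by omega),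
        PySem.List.pyGetD_eq_getElem mochila "" hpos h2]
    have hlt : index.toNat < mochila.length := by omega
    rw [List.drop_eq_getElem_cons hlt]
    have e : (index + 1).toNat = index.toNat + 1 := by omega
    simp [e, if_neg (by omega : ¬ index < 0), if_neg (by omega : ¬ index + 1 < 0)]

-- pvAwrap when the current element matches
lemma Awrap_found (mochila : List String) (index : Int)
    (h1 : -(mochila.length : Int) ≤ index) (h2 : index < (mochila.length : Int))
    (hm : PySem.List.pyGetD mochila index "" = "sable de luz") :
    pvAwrap mochila index = (true, index + 1) := by
  simp only [pvAwrap]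
  rw [if_neg (by omega), pvScan_cons mochila index h1 h2, hm,
      PySem.List.index?_cons_self]
  simp

-- pvAwrap steps past a non-matching element
lemma Awrap_step (mochila : List String) (index : Int)
    (h1 : -(mochila.length : Int) ≤ index) (h2 : index < (mochila.length : Int))
    (hm : PySem.List.pyGetD mochila index "" ≠ "sable de luz") :
    pvAwrap mochila index = pvAwrap mochila (index + 1) := by
  simp only [pvAwrap]
  rw [if_neg (by omega), pvScan_cons mochila index h1 h2,
      PySem.List.index?_cons_of_ne _ hm]
  rcases lt_or_ge (index + 1) (mochila.length : Int) with hlt | hge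
  · rw [if_neg (by omega)]
    cases hfind : PySem.List.index? (pvScan mochila (index + 1)) "sable de luz" with
    | none => simp
    | some k =>
      simp only [Option.map_some]
      congr 1
      omega
  · have hn : index + 1 = (mochila.length : Int) := by omega
    rw [hn, pvScan_len]
    simp [PySem.List.index?]

-- A equals its first-match characterisation on Pre_
lemma A_eq_wrap (mochila : List String) (index : Int)
    (h1 : -(mochila.length : Int) ≤ index) :
    usar_la_fuerza mochila index = pvAwrap mochila index := by
  rcases lt_or_ge index (mochila.length : Int) with h2 | h2
  · rw [usar_la_fuerza.eq_def, if_neg (by omega)]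
    simp only []
    by_cases hm : PySem.List.pyGetD mochila index "" = "sable de luz"
    · rw [if_pos hm, Awrap_found mochila index h1 h2 hm]
    · rw [if_neg hm, Awrap_step mochila index h1 h2 hm]
      exact A_eq_wrap mochila (index + 1) (by omega)
  · rw [usar_la_fuerza.eq_def]
    simp only [pvAwrap]
    rw [if_pos (by omega), if_pos (by omega)]
termination_by ((mochila.length : Int) - index).toNat
decreasing_by omega

-- for negative in-range starts, the slice is the final segment of the list
lemma slice_neg_eq_drop (mochila : List String) (index : Int)
    (h1 : -(mochila.length : Int) ≤ index) (h2 : index < 0) :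
    PySem.List.slice mochila (some index) none =
      mochila.drop ((mochila.length : Int) + index).toNat := by
  set k : Nat := (-index).toNat with hk
  have hik : index = -(k : Int) := by omega
  rw [hik, PySem.List.slice_from_neg_natCast mochila k (by omega)]
  congr 1
  omega

-- the two shapes of the walk
lemma pvScan_neg (mochila : List String) (index : Int) (h : index < 0) :
    pvScan mochila index = PySem.List.slice mochila (some index) none ++ mochila := by
  unfold pvScan; rw [if_pos h]

lemma pvScan_nonneg (mochila : List String) (index : Int) (h : 0 ≤ index) :
    pvScan mochila index = PySem.List.slice mochila (some index) none := by
  unfold pvScan; rw [if_neg (by omega)]; simp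

-- outside D_, the wrapped search agrees with B's slice search
lemma wrap_eq_alt (mochila : List String) (index : Int)
    (h1 : -(mochila.length : Int) ≤ index) (hD : ¬ D_usar_la_fuerza mochila index) :
    pvAwrap mochila index = usar_la_fuerza_alt mochila index := by
  unfold pvAwrap usar_la_fuerza_alt
  by_cases hge : (mochila.length : Int) ≤ index
  · rw [if_pos hge, if_pos hge]
  · rw [if_neg hge, if_neg hge]
    rcases lt_or_ge index 0 with hneg | hpos
    · rw [pvScan_neg mochila index hneg]
      by_cases hmem : "sable de luz" ∈ PySem.List.slice mochila (some index) none
      · rw [PySem.List.index?_append_of_mem _ hmem]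
      · have hno : "sable de luz" ∉ mochila := by
          unfold D_usar_la_fuerza at hD
          rw [slice_neg_eq_drop mochila index h1 hneg] at hmem
          by_contra hc
          exact hD ⟨hneg, h1, hc, hmem⟩
        have hs : PySem.List.index?
            (PySem.List.slice mochila (some index) none ++ mochila) "sable de luz" = none := by
          rw [PySem.List.index?_eq_none_iff]
          simp only [List.mem_append]
          tauto
        have hs2 : PySem.List.index?
            (PySem.List.slice mochila (some index) none) "sable de luz" = none := by
          rw [PySem.List.index?_eq_none_iff]; exact hmem
        rw [hs, hs2]
    · rw [pvScan_nonneg mochila index hpos]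

-- ===== VERDICT (by name: the statements are the Claim_ definitions above) =====
theorem usar_la_fuerza_spec : Claim_unchanged_usar_la_fuerza := by
  intro mochila index _ hpre
  unfold Spec_usar_la_fuerza
  intro hD
  rw [A_eq_wrap mochila index hpre, wrap_eq_alt mochila index hpre hD]

theorem usar_la_fuerza_changed : Claim_changed_usar_la_fuerza := by
  unfold Claim_changed_usar_la_fuerza
  refine ⟨by decide, by decide, by decide, ?_, by decide, by decide⟩
  rw [A_eq_wrap pvDiffWitness_usar_la_fuerza.1 pvDiffWitness_usar_la_fuerza.2 (by decide)]
  decide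

theorem usar_la_fuerza_tight : Claim_exact_usar_la_fuerza := by
  intro mochila index _ hpre hD
  obtain ⟨hneg, h1, hmem, hdrop⟩ := hD
  have hlen : 0 < mochila.length := List.length_pos_of_mem hmem
  rw [A_eq_wrap mochila index hpre]
  unfold pvAwrap usar_la_fuerza_alt
  rw [if_neg (by omega), if_neg (by omega), pvScan_neg mochila index hneg]
  have hs2 : PySem.List.index?
      (PySem.List.slice mochila (some index) none) "sable de luz" = none := by
    rw [PySem.List.index?_eq_none_iff, slice_neg_eq_drop mochila index h1 hneg]
    exact hdrop
  have hs : ("sable de luz") ∈ PySem.List.slice mochila (some index) none ++ mochila := by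
    simp [hmem]
  rw [← PySem.List.index?_isSome_iff] at hs
  cases hfind : PySem.List.index?
      (PySem.List.slice mochila (some index) none ++ mochila) "sable de luz" with
  | none => rw [hfind] at hs; simp at hs
  | some k => rw [hs2]; simp
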